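-- pv_equiv track=rewrite | github.com/saloaaro/TIRA1 | listsplit.py | count
-- ===== SOURCE A (Python) =====
-- def count(t):
--     n = len(t)
--     left_mins = [0] * n
--     right_mins = [0] * n
--     min_count = {}
--     result = 0
--
--     min_val = float('inf')
--     for i in range(n):
--         min_val = min(min_val, t[i])
--         left_mins[i] = min_val
--
--     min_val = float('inf')
--     for i in range(n - 1, -1, -1):
--         min_val = min(min_val, t[i])
--         right_mins[i] = min_val
--
--     for i in range(n - 1):
--         if left_mins[i] == right_mins[i + 1]:
--             result += 1
--
--     return result
-- ===== SOURCE B (Python) =====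
-- def count(t):
--     if not t:
--         return 0
--     m = min(t)
--     return (len(t) - 1 - t[::-1].index(m)) - t.index(m)
-- ===== Notes on version B (the rewrite author's own statement) =====
-- stated objective: simpler
-- what changed: Replaces the prefix-min/suffix-min arrays and the per-split comparison loop by the closed form last-occurrence-of-min minus first-occurrence-of-min (a split works iff both sides' minima equal the global minimum).
import Mathlib
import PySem

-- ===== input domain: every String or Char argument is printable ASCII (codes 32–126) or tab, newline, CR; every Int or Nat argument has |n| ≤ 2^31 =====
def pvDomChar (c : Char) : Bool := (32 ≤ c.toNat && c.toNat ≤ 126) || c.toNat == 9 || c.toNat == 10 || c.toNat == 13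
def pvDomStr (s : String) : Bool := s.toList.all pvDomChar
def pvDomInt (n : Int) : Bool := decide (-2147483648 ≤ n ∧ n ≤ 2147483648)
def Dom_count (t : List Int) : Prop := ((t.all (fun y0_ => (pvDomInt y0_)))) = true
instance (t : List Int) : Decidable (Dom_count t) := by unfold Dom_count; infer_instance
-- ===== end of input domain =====

-- B replaces the prefix-min/suffix-min arrays and the per-split loop by the closed form
-- "last occurrence of the minimum minus first occurrence of the minimum" (simpler, O(1) extra state).

-- ===== PORT A =====
-- loop body of the forward prefix-min loop: min_val (float('inf') = none) and the growing left_mins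
def stepA (st : Option Int × List Int) (v : Int) : Option Int × List Int :=
  let m := match st.1 with | none => v | some mv => min mv v
  (some m, st.2 ++ [m])

-- loop body of the backward suffix-min loop (fills right_mins from the back, i.e. prepends)
def stepAR (st : Option Int × List Int) (v : Int) : Option Int × List Int :=
  let m := match st.1 with | none => v | some mv => min mv v
  (some m, [m] ++ st.2)

-- the two index loops visit t[i] in forward resp. backward order, so they are folds over t / t.reverse
def count (t : List Int) : Int :=
  let n : Int := t.length
  let left_mins := (t.foldl stepA (none, [])).2
  let right_mins := (t.reverse.foldl stepAR (none, [])).2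
  (PySem.List.pyRange 0 (n - 1) 1).foldl
    (fun r i => if PySem.List.pyGet? left_mins i = PySem.List.pyGet? right_mins (i + 1) then r + 1 else r) 0

-- ===== PORT B =====
def count_alt (t : List Int) : Int :=
  if t = [] then 0
  else
    let m := (PySem.List.min? t id).getD 0
    let first : Int := ((PySem.List.index? t m).getD 0 : Nat)
    let lastr : Int := ((PySem.List.index? ((PySem.List.slice? t none none (-1)).getD []) m).getD 0 : Nat)
    ((t.length : Int) - 1 - lastr) - first

-- ===== PRECONDITION & SPEC =====
def Spec_count (t : List Int) (out : Int) : Prop := out = count_alt t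
instance (t : List Int) (out : Int) : Decidable (Spec_count t out) := by unfold Spec_count; infer_instance

-- ===== CLAIM (what is proved, stated in full; the proofs are below) =====
def Claim_equal_count : Prop := ∀ (t : List Int), Dom_count t → Spec_count t (count t)

-- ===== LEMMAS AND PROOFS =====

-- min of a nonempty list, written as Python's running min
def dmin : List Int → Int
  | [] => 0
  | x :: r => r.foldl min x

theorem foldl_min_le_init (l : List Int) (a : Int) : l.foldl min a ≤ a := by
  induction l generalizing a with
  | nil => simp
  | cons x r ih => exact le_trans (ih (min a x)) (min_le_left a x)

theorem foldl_min_le_mem (l : List Int) (a : Int) (y : Int) (hy : y ∈ l) : l.foldl min a ≤ y := by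
  induction l generalizing a with
  | nil => simp at hy
  | cons x r ih =>
    simp only [List.mem_cons] at hy
    rcases hy with h | h
    · exact le_trans (foldl_min_le_init r (min a x)) (by rw [h]; exact min_le_right a x)
    · exact ih (min a x) h

theorem foldl_min_mem (l : List Int) (a : Int) : l.foldl min a = a ∨ l.foldl min a ∈ l := by
  induction l generalizing a with
  | nil => simp
  | cons x r ih =>
    simp only [List.foldl_cons]
    rcases ih (min a x) with h | h
    · rcases le_total a x with h2 | h2
      · left; rw [h, min_eq_left h2]
      · right; rw [h, min_eq_right h2]; simp
    · right; simp [h]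

theorem dmin_mem (l : List Int) (h : l ≠ []) : dmin l ∈ l := by
  cases l with
  | nil => simp at h
  | cons x r =>
    rcases foldl_min_mem r x with h2 | h2
    · simp [dmin, h2]
    · simp [dmin, h2]

theorem dmin_le (l : List Int) (y : Int) (hy : y ∈ l) : dmin l ≤ y := by
  cases l with
  | nil => simp at hy
  | cons x r =>
    simp only [List.mem_cons] at hy
    rcases hy with h | h
    · exact le_trans (foldl_min_le_init r x) (by rw [h])
    · exact foldl_min_le_mem r x y h

-- the accumulator of stepA is only appended to
theorem stepA_acc (xs : List Int) (o : Option Int) (acc : List Int) :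
    (xs.foldl stepA (o, acc)).2 = acc ++ (xs.foldl stepA (o, [])).2 := by
  induction xs generalizing o acc with
  | nil => simp
  | cons x r ih =>
    simp only [List.foldl_cons, stepA]
    rw [ih _ (acc ++ _), ih _ ([] ++ _)]
    simp

-- the backward loop builds exactly the reverse of the forward loop's list
theorem stepAR_rev (xs : List Int) (o : Option Int) (acc : List Int) :
    (xs.foldl stepAR (o, acc)).2 = (xs.foldl stepA (o, [])).2.reverse ++ acc := by
  induction xs generalizing o acc with
  | nil => simp
  | cons x r ih =>
    simp only [List.foldl_cons, stepAR, stepA]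
    rw [ih _ ([_] ++ acc), stepA_acc r _ ([] ++ [_])]
    simp

-- closed form of the forward scan started at a known value a
theorem leftA (a : Int) (xs : List Int) :
    (xs.foldl stepA (some a, [])).2
      = (List.range xs.length).map (fun i => (xs.take (i+1)).foldl min a) := by
  induction xs generalizing a with
  | nil => simp
  | cons x r ih =>
    simp only [List.foldl_cons, stepA]
    rw [stepA_acc r _ ([] ++ [_]), ih (min a x)]
    simp [List.range_succ_eq_map, List.map_map, Function.comp_def]

-- entries of left_mins are the prefix minima
theorem leftm_char (x : Int) (xs : List Int) :
    ((x :: xs).foldl stepA (none, [])).2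
      = (List.range (xs.length + 1)).map (fun i => dmin ((x :: xs).take (i+1))) := by
  simp only [List.foldl_cons, stepA]
  rw [stepA_acc xs _ ([] ++ [x]), leftA x xs]
  simp only [List.range_succ_eq_map, List.map_map, Function.comp_def, List.map_cons]
  simp [dmin]

theorem countP_range_band (f l N : Nat) (h : f ≤ l) :
    (List.range N).countP (fun i => decide (f ≤ i ∧ i < l)) = min l N - min f N := by
  induction N with
  | zero => simp
  | succ N ih =>
    rw [List.range_succ, List.countP_append, ih]
    by_cases hf : f ≤ N <;> by_cases hl : N < l <;>
      simp [hf, hl] <;> omega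

theorem mem_take_iff_first (t : List Int) (m : Int) (f : Nat)
    (hft : t[f]? = some m) (hffirst : ∀ j, j < f → t[j]? ≠ some m)
    (k : Nat) : m ∈ t.take k ↔ f < k := by
  constructor
  · intro h
    obtain ⟨j, hj⟩ := List.mem_iff_getElem?.mp h
    have hjk : j < k := by
      by_contra hc
      rw [List.getElem?_eq_none (by simp [List.length_take]; omega)] at hj
      simp at hj
    rw [List.getElem?_take_of_lt hjk] at hj
    have : ¬ j < f := fun hlt => hffirst j hlt hj
    omega
  · intro h
    exact List.mem_iff_getElem?.mpr ⟨f, by rw [List.getElem?_take_of_lt h]; exact hft⟩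

theorem mem_drop_iff_last (t : List Int) (m : Int) (l : Nat)
    (hlt : t[l]? = some m) (hlast : ∀ j, l < j → t[j]? ≠ some m)
    (k : Nat) : m ∈ t.drop k ↔ k ≤ l := by
  constructor
  · intro h
    obtain ⟨j, hj⟩ := List.mem_iff_getElem?.mp h
    rw [List.getElem?_drop] at hj
    have : ¬ l < k + j := fun hc => hlast _ hc hj
    omega
  · intro h
    exact List.mem_iff_getElem?.mpr ⟨l - k, by rw [List.getElem?_drop]; rw [show k + (l - k) = l by omega]; exact hlt⟩

theorem key_iff (t : List Int) (m : Int) (f l : Nat)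
    (hmin : ∀ y ∈ t, m ≤ y)
    (hft : t[f]? = some m) (hffirst : ∀ j, j < f → t[j]? ≠ some m)
    (hlt : t[l]? = some m) (hlast : ∀ j, l < j → t[j]? ≠ some m)
    (i : Nat) (hi : i + 1 < t.length) :
    (dmin (t.take (i+1)) = dmin ((t.drop (i+1)).reverse)) ↔ (f ≤ i ∧ i < l) := by
  have hmemt : m ∈ t := List.mem_iff_getElem?.mpr ⟨f, hft⟩
  have htne : t.take (i+1) ≠ [] := by
    have : (t.take (i+1)).length = min (i+1) t.length := List.length_take
    intro hc; rw [hc] at this; simp at this; omega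
  have hdne : (t.drop (i+1)).reverse ≠ [] := by
    have : (t.drop (i+1)).length = t.length - (i+1) := List.length_drop
    intro hc
    rw [List.reverse_eq_nil_iff] at hc
    rw [hc] at this; simp at this; omega
  have hAmem : dmin (t.take (i+1)) ∈ t := List.mem_of_mem_take (dmin_mem _ htne)
  have hBmem : dmin ((t.drop (i+1)).reverse) ∈ t :=
    List.mem_of_mem_drop (List.mem_reverse.mp (dmin_mem _ hdne))
  have htake := mem_take_iff_first t m f hft hffirst (i+1)
  have hdrop := mem_drop_iff_last t m l hlt hlast (i+1)
  constructor
  · intro heq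
    have hm2 : m ∈ t.take (i+1) ++ t.drop (i+1) := by
      rw [List.take_append_drop]; exact hmemt
    have hsplit := List.mem_append.mp hm2
    have hboth : m ∈ t.take (i+1) ∧ m ∈ t.drop (i+1) := by
      rcases hsplit with h | h
      · have h1 : dmin (t.take (i+1)) = m :=
          le_antisymm (dmin_le _ m h) (hmin _ hAmem)
        have h2 : dmin ((t.drop (i+1)).reverse) = m := by rw [← heq]; exact h1
        refine ⟨h, ?_⟩
        rw [← h2]
        exact List.mem_reverse.mp (dmin_mem _ hdne)
      · have h1 : dmin ((t.drop (i+1)).reverse) = m :=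
          le_antisymm (dmin_le _ m (List.mem_reverse.mpr h)) (hmin _ hBmem)
        have h2 : dmin (t.take (i+1)) = m := by rw [heq]; exact h1
        refine ⟨?_, h⟩
        rw [← h2]
        exact dmin_mem _ htne
    have h1 := htake.mp hboth.1
    have h2 := hdrop.mp hboth.2
    omega
  · rintro ⟨h1, h2⟩
    have hmtake : m ∈ t.take (i+1) := htake.mpr (by omega)
    have hmdrop : m ∈ t.drop (i+1) := hdrop.mpr (by omega)
    have e1 : dmin (t.take (i+1)) = m := le_antisymm (dmin_le _ m hmtake) (hmin _ hAmem)
    have e2 : dmin ((t.drop (i+1)).reverse) = m :=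
      le_antisymm (dmin_le _ m (List.mem_reverse.mpr hmdrop)) (hmin _ hBmem)
    rw [e1, e2]

theorem count_spec_aux : ∀ (t : List Int), count t = count_alt t := by
  intro t
  by_cases ht : t = []
  · subst ht; decide
  -- n and the extremal data
  set n := t.length with hn
  have hn1 : 1 ≤ n := by
    cases t with
    | nil => exact absurd rfl ht
    | cons a r => simp [hn]
  -- the minimum value m
  obtain ⟨m, hm⟩ : ∃ m, PySem.List.min? t id = some m := by
    cases hmo : PySem.List.min? t id with
    | none => exact absurd ((PySem.List.min?_eq_none_iff t id).mp hmo) ht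
    | some m => exact ⟨m, rfl⟩
  have hmem : m ∈ t := PySem.List.min?_mem hm
  have hmin : ∀ y ∈ t, m ≤ y := fun y hy => PySem.List.min?_isMin hm y hy
  -- first index f
  obtain ⟨f, hf⟩ : ∃ f, PySem.List.index? t m = some f := by
    have := (PySem.List.index?_isSome_iff t m).mpr hmem
    exact Option.isSome_iff_exists.mp this
  obtain ⟨hfn, hfe, hffirst'⟩ := PySem.List.getElem_of_index?_eq_some hf
  have hft : t[f]? = some m := by rw [List.getElem?_eq_getElem hfn, hfe]
  have hffirst : ∀ j, j < f → t[j]? ≠ some m := by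
    intro j hj hc
    have hjn : j < n := lt_trans hj hfn
    rw [List.getElem?_eq_getElem hjn] at hc
    exact hffirst' j hj (Option.some.inj hc)
  -- last index l via the reversed list
  obtain ⟨rr, hr⟩ : ∃ rr, PySem.List.index? t.reverse m = some rr := by
    have := (PySem.List.index?_isSome_iff t.reverse m).mpr (List.mem_reverse.mpr hmem)
    exact Option.isSome_iff_exists.mp this
  obtain ⟨hrn', hre, hrfirst'⟩ := PySem.List.getElem_of_index?_eq_some hr
  have hrn : rr < n := by simpa using hrn'
  set l := n - 1 - rr with hl
  have hlt : t[l]? = some m := by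
    have h1 := List.getElem?_reverse (l := t) (i := rr) (by simpa using hrn)
    rw [← hn] at h1
    rw [hl, ← h1, List.getElem?_eq_getElem hrn', hre]
  have hlast : ∀ j, l < j → t[j]? ≠ some m := by
    intro j hj hc
    have hjn : j < n := by
      by_contra hcc
      rw [List.getElem?_eq_none (by omega)] at hc; simp at hc
    have hrev : t.reverse[n - 1 - j]? = t[j]? := by
      have := List.getElem?_reverse (l := t) (i := n - 1 - j) (by simp [hn]; omega)
      rw [this]
      congr 1
      omega
    have hlt2 : n - 1 - j < rr := by omega
    have hne := hrfirst' (n - 1 - j) hlt2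
    have hsome : t.reverse[n - 1 - j]? = some m := by rw [hrev]; exact hc
    have hlen : n - 1 - j < t.reverse.length := by rw [List.length_reverse, ← hn]; omega
    rw [List.getElem?_eq_getElem hlen] at hsome
    exact hne (Option.some.inj hsome)
  have hfl : f ≤ l := by
    by_contra hc
    exact hffirst l (by omega) hlt
  have hln : l ≤ n - 1 := by omega
  -- RHS: count_alt t = (n - 1 - rr) - f
  have hrhs : count_alt t = ((n : Int) - 1 - (rr : Int)) - (f : Int) := by
    simp only [count_alt, if_neg ht, PySem.List.slice?_none_none_neg_one, Option.getD_some, hm, hf, hr, hn]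
  -- LHS
  obtain ⟨x, xs, hx⟩ : ∃ x xs, t = x :: xs := by
    cases t with
    | nil => exact absurd rfl ht
    | cons a r => exact ⟨a, r, rfl⟩
  have hxs : xs.length + 1 = n := by rw [hn, hx]; simp
  have hleft : (t.foldl stepA (none, [])).2
      = (List.range n).map (fun i => dmin (t.take (i+1))) := by
    rw [hx, leftm_char]
    rw [show xs.length + 1 = n from hxs]
  obtain ⟨y, ys, hy⟩ : ∃ y ys, t.reverse = y :: ys := by
    cases hrv : t.reverse with
    | nil => rw [List.reverse_eq_nil_iff] at hrv; exact absurd hrv ht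
    | cons a r => exact ⟨a, r, rfl⟩
  have hys : ys.length + 1 = n := by
    have : t.reverse.length = n := by simp [hn]
    rw [hy] at this; simpa using this
  have hright : (t.reverse.foldl stepAR (none, [])).2
      = ((List.range n).map (fun i => dmin (t.reverse.take (i+1)))).reverse := by
    rw [stepAR_rev, List.append_nil, hy, leftm_char, ← hy]
    rw [show ys.length + 1 = n from hys]
  -- the count loop
  have hcast : (n : Int) - 1 = ((n - 1 : Nat) : Int) := by omega
  rw [count]
  simp only [← hn]
  rw [hcast, PySem.List.pyRange_zero_natCast, hleft, hright]
  have hfun : (fun (r : Int) (i : Int) =>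
      if PySem.List.pyGet? ((List.range n).map (fun i => dmin (t.take (i+1)))) i
        = PySem.List.pyGet? (((List.range n).map (fun i => dmin (t.reverse.take (i+1)))).reverse) (i + 1)
      then r + 1 else r)
      = (fun (r : Int) (z : Int) =>
      if (fun z => decide (PySem.List.pyGet? ((List.range n).map (fun i => dmin (t.take (i+1)))) z
        = PySem.List.pyGet? (((List.range n).map (fun i => dmin (t.reverse.take (i+1)))).reverse) (z + 1))) z = true
      then r + 1 else r) := by
    funext r z
    by_cases h : PySem.List.pyGet? ((List.range n).map (fun i => dmin (t.take (i+1)))) z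
        = PySem.List.pyGet? (((List.range n).map (fun i => dmin (t.reverse.take (i+1)))).reverse) (z + 1) <;>
      simp [h]
  rw [hfun, PySem.List.foldl_count_if]
  rw [List.countP_map]
  have hcongr : List.countP
      ((fun z => decide (PySem.List.pyGet? ((List.range n).map (fun i => dmin (t.take (i+1)))) z
        = PySem.List.pyGet? (((List.range n).map (fun i => dmin (t.reverse.take (i+1)))).reverse) (z + 1)))
        ∘ (fun k : Nat => (k : Int))) (List.range (n - 1))
      = List.countP (fun i => decide (f ≤ i ∧ i < l)) (List.range (n - 1)) := by
    apply List.countP_congr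
    intro i hi
    rw [List.mem_range] at hi
    simp only [Function.comp_apply, decide_eq_true_eq]
    have hcast2 : (i : Int) + 1 = ((i + 1 : Nat) : Int) := by push_cast; ring
    rw [hcast2, PySem.List.pyGet?_natCast, PySem.List.pyGet?_natCast]
    have hi1 : i < n := by omega
    have hi2 : i + 1 < n := by omega
    have hlen2 : i + 1 < ((List.range n).map (fun i => dmin (t.reverse.take (i+1)))).length := by
      simpa using hi2
    rw [List.getElem?_reverse hlen2]
    have e1 : ((List.range n).map (fun i => dmin (t.take (i+1))))[i]?
        = some (dmin (t.take (i+1))) := by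
      simp [hi1]
    have harith : ((List.range n).map (fun i => dmin (t.reverse.take (i+1)))).length - 1 - (i + 1)
        = n - 1 - (i + 1) := by simp
    rw [harith]
    have e2 : ((List.range n).map (fun i => dmin (t.reverse.take (i+1))))[n - 1 - (i+1)]?
        = some (dmin (t.reverse.take (n - (i+1)))) := by
      have : n - 1 - (i+1) < n := by omega
      simp only [List.getElem?_map, List.getElem?_range, this, Option.map_some]
      rw [show n - 1 - (i+1) + 1 = n - (i+1) by omega]
    rw [e1, e2]
    have hrevdrop : t.reverse.take (n - (i+1)) = (t.drop (i+1)).reverse := by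
      rw [List.reverse_drop, hn]
    rw [hrevdrop, Option.some.injEq]
    rw [key_iff t m f l hmin hft hffirst hlt hlast i (by omega)]
  rw [hcongr, countP_range_band f l (n-1) hfl]
  rw [Nat.min_eq_left hln, Nat.min_eq_left (le_trans hfl hln)]
  rw [hrhs]
  omega

-- ===== VERDICT (by name: the statement is the Claim_ definition above) =====
theorem count_spec : Claim_equal_count := by
  intro t _
  unfold Spec_count
  exact count_spec_aux t
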